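-- pv_equiv track=rewrite | github.com/icrphysics/RSStaticCodeChecker | RSStaticCodeChecker/static_code_checker/generated/argument_change_1227.py | argumentsRight
-- ===== SOURCE A (Python) =====
-- def argumentsRight(d):
--     args = ["FloatingExaminationName","ReferenceExaminationName","UseOnlyTranslations","HighWeightOnBones","InitializeImages","FocusRoisNames","RegistrationName"]
--     too_many = []
--     for keyword in d.get("keywords", []):
--         if keyword.get("arg") in args:
--             args.remove(keyword.get("arg"))
--         else:
--             too_many.append(keyword.get("arg"))
--     if not too_many and not args:
--         return True
--     return (0 if too_many else 3)
-- ===== SOURCE B (Python) =====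
-- def argumentsRight(d):
--     required = {"FloatingExaminationName","ReferenceExaminationName","UseOnlyTranslations",
--                 "HighWeightOnBones","InitializeImages","FocusRoisNames","RegistrationName"}
--     seen = [kw.get("arg") for kw in d.get("keywords", [])]
--     counts = {}
--     for a in seen:
--         counts[a] = counts.get(a, 0) + 1
--     if any(a not in required or counts[a] > 1 for a in seen):
--         return 0
--     return True if all(r in seen for r in required) else 3
-- ===== Notes on version B (the rewrite author's own statement) =====
-- stated objective: alternative
-- what changed: Replaces A's single pass that destructively remove()s names from the required list and accumulates a too_many list with two read-only passes: build the seen arg values and an occurrence-count table once, reject (0) if any arg is unknown or duplicated, otherwise decide True vs 3 by a separate all()-presence check.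
import Mathlib
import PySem

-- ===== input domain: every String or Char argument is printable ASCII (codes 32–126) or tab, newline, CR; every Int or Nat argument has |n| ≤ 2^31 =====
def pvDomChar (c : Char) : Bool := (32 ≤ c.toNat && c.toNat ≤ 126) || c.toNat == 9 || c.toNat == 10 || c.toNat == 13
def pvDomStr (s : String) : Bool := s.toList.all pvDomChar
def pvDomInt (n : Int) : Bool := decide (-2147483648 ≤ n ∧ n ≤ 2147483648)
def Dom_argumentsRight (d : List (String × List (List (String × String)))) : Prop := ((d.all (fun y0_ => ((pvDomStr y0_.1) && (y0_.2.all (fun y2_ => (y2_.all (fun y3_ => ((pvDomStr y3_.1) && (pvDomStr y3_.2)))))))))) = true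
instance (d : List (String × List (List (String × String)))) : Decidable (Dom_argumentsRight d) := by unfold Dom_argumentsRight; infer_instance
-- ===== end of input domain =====

-- B replaces A's destructive remove()-loop by two read-only passes (a membership/duplicate
-- scan over a precomputed count table, then a presence check); objective: alternative.

-- ===== PORT A =====
def argumentsRight (d : List (String × List (List (String × String)))) : Int :=
  let args0 : List String := ["FloatingExaminationName","ReferenceExaminationName","UseOnlyTranslations","HighWeightOnBones","InitializeImages","FocusRoisNames","RegistrationName"]
  let st := ((PySem.Dict.mk d).getD "keywords" []).foldl
    (fun (st : List String × List (Option String)) keyword =>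
      match (PySem.Dict.mk keyword).get? "arg" with
      | some s => if s ∈ st.1 then ((PySem.List.remove? st.1 s).getD st.1, st.2)
                  else (st.1, st.2 ++ [some s])
      | none => (st.1, st.2 ++ [none]))
    (args0, ([] : List (Option String)))
  if st.2 = [] ∧ st.1 = [] then 1 else if st.2 = [] then 3 else 0

-- ===== PORT B =====
def argumentsRight_alt (d : List (String × List (List (String × String)))) : Int :=
  let required : PySem.Set String := PySem.Set.ofList ["FloatingExaminationName","ReferenceExaminationName","UseOnlyTranslations","HighWeightOnBones","InitializeImages","FocusRoisNames","RegistrationName"]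
  let seen : List (Option String) := ((PySem.Dict.mk d).getD "keywords" []).map (fun kw => (PySem.Dict.mk kw).get? "arg")
  let counts : PySem.Dict (Option String) Int :=
    seen.foldl (fun c a => c.insert a (c.getD a 0 + 1)) PySem.Dict.empty
  if seen.any (fun a =>
      !(match a with | some s => PySem.Set.contains required s | none => false)
        || decide (counts.getD a 0 > 1)) then 0
  else if (["FloatingExaminationName","ReferenceExaminationName","UseOnlyTranslations","HighWeightOnBones","InitializeImages","FocusRoisNames","RegistrationName"] : List String).all
            (fun r => seen.contains (some r)) then 1 else 3

-- ===== PRECONDITION & SPEC =====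
def Spec_argumentsRight (d : List (String × List (List (String × String)))) (out : Int) : Prop := out = argumentsRight_alt d
instance (d : List (String × List (List (String × String)))) (out : Int) : Decidable (Spec_argumentsRight d out) := by unfold Spec_argumentsRight; infer_instance

-- ===== CLAIM (what is proved, stated in full; the proofs are below) =====
def Claim_equal_argumentsRight : Prop := ∀ (d : List (String × List (List (String × String)))), Dom_argumentsRight d → Spec_argumentsRight d (argumentsRight d)

-- ===== LEMMAS AND PROOFS =====

-- A's loop body, as a function of the looked-up "arg" value
def pvStep (st : List String × List (Option String)) (a : Option String) :
    List String × List (Option String) :=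
  match a with
  | some s => if s ∈ st.1 then ((PySem.List.remove? st.1 s).getD st.1, st.2)
              else (st.1, st.2 ++ [some s])
  | none => (st.1, st.2 ++ [none])

theorem pvStep_remove (args : List String) (tm : List (Option String)) (s : String)
    (h : s ∈ args) : pvStep (args, tm) (some s) = (args.erase s, tm) := by
  simp [pvStep, h, PySem.List.remove?_eq_some_erase args s h]

-- A's loop over the keyword dicts is pvStep folded over the looked-up arg values
theorem pvFold_eq (kws : List (List (String × String))) (init : List String × List (Option String)) :
    kws.foldl
      (fun (st : List String × List (Option String)) keyword =>
        match (PySem.Dict.mk keyword).get? "arg" with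
        | some s => if s ∈ st.1 then ((PySem.List.remove? st.1 s).getD st.1, st.2)
                    else (st.1, st.2 ++ [some s])
        | none => (st.1, st.2 ++ [none])) init
    = (kws.map (fun kw => (PySem.Dict.mk kw).get? "arg")).foldl pvStep init := by
  rw [List.foldl_map]; rfl

-- final `args` = initial args minus the names mentioned in l (args nodup)
theorem pvLoop_fst (l : List (Option String)) (args : List String)
    (tm : List (Option String)) (hn : args.Nodup) :
    (l.foldl pvStep (args, tm)).1 = args.filter (fun x => !(l.contains (some x))) := by
  induction l generalizing args tm with
  | nil => simp
  | cons a l ih =>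
    cases a with
    | none =>
      simp only [List.foldl_cons, pvStep, ih _ _ hn]
      apply List.filter_congr; intro x _; simp
    | some s =>
      by_cases hs : s ∈ args
      · rw [List.foldl_cons, pvStep_remove args tm s hs, ih _ _ (hn.erase s)]
        rw [List.Nodup.erase_eq_filter hn s, List.filter_filter]
        apply List.filter_congr; intro x _
        simp only [List.contains_cons, Bool.not_or, bne, Bool.and_comm]
        simp
      · simp only [List.foldl_cons, pvStep, if_neg hs, ih _ _ hn]
        apply List.filter_congr; intro x hx
        have hne : ¬ (some x = some s) := by
          simp only [Option.some.injEq]; rintro rfl; exact hs hx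
        simp [hne]

-- the `too_many` accumulator only grows by appending
theorem pvLoop_snd_acc (l : List (Option String)) (args : List String)
    (tm : List (Option String)) :
    (l.foldl pvStep (args, tm)).2 = tm ++ (l.foldl pvStep (args, [])).2 := by
  induction l generalizing args tm with
  | nil => simp
  | cons a l ih =>
    cases a with
    | none =>
      simp only [List.foldl_cons, pvStep]
      rw [ih _ (tm ++ [none]), ih _ ([] ++ [none])]
      simp
    | some s =>
      by_cases hs : s ∈ args
      · rw [List.foldl_cons, pvStep_remove args tm s hs,
          List.foldl_cons, pvStep_remove args [] s hs]
        exact ih _ tm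
      · simp only [List.foldl_cons, pvStep, if_neg hs]
        rw [ih _ (tm ++ [some s]), ih _ ([] ++ [some s])]
        simp
-- `too_many` ends empty iff every arg is a required one and none repeats
theorem pvLoop_snd_nil (l : List (Option String)) (args : List String)
    (hn : args.Nodup) :
    (l.foldl pvStep (args, [])).2 = [] ↔
      ((∀ a ∈ l, ∃ x ∈ args, a = some x) ∧ l.Nodup) := by
  induction l generalizing args with
  | nil => simp
  | cons a l ih =>
    cases a with
    | none =>
      simp only [List.foldl_cons, pvStep]
      rw [pvLoop_snd_acc]
      simp
    | some s =>
      by_cases hs : s ∈ args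
      · rw [List.foldl_cons, pvStep_remove args [] s hs, ih _ (hn.erase s)]
        constructor
        · rintro ⟨h1, h2⟩
          refine ⟨?_, ?_⟩
          · intro a ha
            rcases List.mem_cons.mp ha with rfl | ha
            · exact ⟨s, hs, rfl⟩
            · obtain ⟨x, hx, rfl⟩ := h1 a ha
              exact ⟨x, List.mem_of_mem_erase hx, rfl⟩
          · rw [List.nodup_cons]
            refine ⟨?_, h2⟩
            intro hmem
            obtain ⟨x, hx, hxe⟩ := h1 _ hmem
            obtain rfl : s = x := Option.some.inj hxe
            exact (List.Nodup.not_mem_erase hn) hx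
        · rintro ⟨h1, h2⟩
          rw [List.nodup_cons] at h2
          refine ⟨?_, h2.2⟩
          intro a ha
          obtain ⟨x, hx, rfl⟩ := h1 a (List.mem_cons_of_mem _ ha)
          refine ⟨x, ?_, rfl⟩
          rw [List.Nodup.mem_erase_iff hn]
          refine ⟨?_, hx⟩
          rintro rfl; exact h2.1 ha
      · simp only [List.foldl_cons, pvStep, if_neg hs]
        rw [pvLoop_snd_acc]
        simp only [List.nil_append, List.append_eq_nil_iff, List.cons_ne_nil, false_and]
        constructor
        · intro h; exact absurd h (by simp)
        · rintro ⟨h1, _⟩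
          obtain ⟨x, hx, hxe⟩ := h1 (some s) (List.mem_cons_self ..)
          obtain rfl : s = x := Option.some.inj hxe
          exact absurd hx hs

def pvArgs0 : List String := ["FloatingExaminationName","ReferenceExaminationName","UseOnlyTranslations","HighWeightOnBones","InitializeImages","FocusRoisNames","RegistrationName"]

theorem pvArgs0_nodup : pvArgs0.Nodup := by decide

theorem pvRequired_eq : PySem.Set.ofList pvArgs0 = pvArgs0 := by decide

theorem argumentsRight_eq_alt (d : List (String × List (List (String × String)))) :
    argumentsRight d = argumentsRight_alt d := by
  simp only [argumentsRight, argumentsRight_alt]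
  rw [pvFold_eq]
  rw [show (["FloatingExaminationName","ReferenceExaminationName","UseOnlyTranslations","HighWeightOnBones","InitializeImages","FocusRoisNames","RegistrationName"] : List String) = pvArgs0 from rfl]
  generalize ((PySem.Dict.mk d).getD "keywords" []).map (fun kw => (PySem.Dict.mk kw).get? "arg") = seen
  have hfst := pvLoop_fst seen pvArgs0 [] pvArgs0_nodup
  have hsnd := pvLoop_snd_nil seen pvArgs0 pvArgs0_nodup
  have hcnt : ∀ a : Option String,
      (seen.foldl (fun c a => c.insert a (c.getD a 0 + 1)) (PySem.Dict.empty : PySem.Dict (Option String) Int)).getD a 0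
        = (seen.count a : Int) := by
    intro a
    rw [PySem.Dict.getD_foldl_insert_add_one]
    simp
  have hany :
      (seen.any (fun a =>
        !(match a with | some s => PySem.Set.contains (PySem.Set.ofList pvArgs0) s | none => false)
          || decide ((seen.foldl (fun c a => c.insert a (c.getD a 0 + 1)) (PySem.Dict.empty : PySem.Dict (Option String) Int)).getD a 0 > 1)))
      = !decide ((∀ a ∈ seen, ∃ x ∈ pvArgs0, a = some x) ∧ seen.Nodup) := by
    rw [pvRequired_eq]
    simp only [List.any_eq, hcnt]
    rw [Bool.eq_iff_iff]
    simp only [Bool.or_eq_true, Bool.not_eq_eq_eq_not, Bool.not_true,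
      decide_eq_true_eq, decide_eq_false_iff_not, not_and, List.nodup_iff_count_le_one]
    constructor
    · rintro ⟨a, ha, hbad | hbad⟩
      · intro hall
        obtain ⟨x, hx, rfl⟩ := hall a ha
        simp only [PySem.Set.contains, List.contains_eq_mem] at hbad
        simp [hx] at hbad
      · intro _ hle
        have h2 := hle a
        omega
    · intro h
      by_cases hall : ∀ a ∈ seen, ∃ x ∈ pvArgs0, a = some x
      · have hnd := h hall
        push Not at hnd
        obtain ⟨a, ha⟩ := hnd
        have hmem : a ∈ seen := List.count_pos_iff.mp (by omega)
        exact ⟨a, hmem, Or.inr (by omega)⟩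
      · push Not at hall
        obtain ⟨a, ha, hbad⟩ := hall
        refine ⟨a, ha, Or.inl ?_⟩
        cases a with
        | none => simp
        | some s =>
          have hns : s ∉ pvArgs0 := fun hc => hbad s hc rfl
          simp [PySem.Set.contains, List.contains_eq_mem, hns]
  rw [hany]
  have hargs :
      ((seen.foldl pvStep (pvArgs0, ([] : List (Option String)))).1 = [])
      ↔ (pvArgs0.all (fun r => seen.contains (some r)) = true) := by
    rw [hfst]
    simp [List.filter_eq_nil_iff, List.all_eq_true]
  by_cases hP : (∀ a ∈ seen, ∃ x ∈ pvArgs0, a = some x) ∧ seen.Nodup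
  · have htm : (seen.foldl pvStep (pvArgs0, ([] : List (Option String)))).2 = [] := hsnd.mpr hP
    have hC3 : ¬ ((!decide ((∀ a ∈ seen, ∃ x ∈ pvArgs0, a = some x) ∧ seen.Nodup)) = true) := by
      intro h
      rw [Bool.not_eq_true', decide_eq_false_iff_not] at h
      exact h hP
    rw [if_neg hC3]
    by_cases hempty : pvArgs0.all (fun r => seen.contains (some r)) = true
    · have h1 : (seen.foldl pvStep (pvArgs0, ([] : List (Option String)))).2 = [] ∧
          (seen.foldl pvStep (pvArgs0, ([] : List (Option String)))).1 = [] :=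
        ⟨htm, hargs.mpr hempty⟩
      rw [if_pos h1, if_pos hempty]
    · have h1 : ¬ ((seen.foldl pvStep (pvArgs0, ([] : List (Option String)))).2 = [] ∧
          (seen.foldl pvStep (pvArgs0, ([] : List (Option String)))).1 = []) := by
        rintro ⟨-, hh⟩; exact hempty (hargs.mp hh)
      rw [if_neg h1, if_pos htm, if_neg hempty]
  · have htm : ¬ (seen.foldl pvStep (pvArgs0, ([] : List (Option String)))).2 = [] :=
      fun h => hP (hsnd.mp h)
    have hC3 : (!decide ((∀ a ∈ seen, ∃ x ∈ pvArgs0, a = some x) ∧ seen.Nodup)) = true := by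
      rw [Bool.not_eq_true', decide_eq_false_iff_not]
      exact hP
    have h1 : ¬ ((seen.foldl pvStep (pvArgs0, ([] : List (Option String)))).2 = [] ∧
        (seen.foldl pvStep (pvArgs0, ([] : List (Option String)))).1 = []) := fun h => htm h.1
    rw [if_pos hC3, if_neg h1, if_neg htm]

-- ===== VERDICT (by name: the statement is the Claim_ definition above) =====
theorem argumentsRight_spec : Claim_equal_argumentsRight := by
  intro d _
  unfold Spec_argumentsRight
  exact argumentsRight_eq_alt d
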